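-- pv_equiv track=rewrite | github.com/Jay-omnibio/Pick_Place | tools/run_batch_eval.py | _count_reason_events
-- ===== SOURCE A (Python) =====
-- from typing import Dict, List, Optional, Tuple
--
-- def _count_reason_events(rows: List[dict], key: str, reason: str) -> int:
--     count = 0
--     prev_active = False
--     for r in rows:
--         cur_active = str(r.get(key, "")).strip() == reason
--         if cur_active and not prev_active:
--             count += 1
--         prev_active = cur_active
--     return count
-- ===== SOURCE B (Python) =====
-- def _count_reason_events(rows, key, reason):
--     actives = [str(r.get(key, "")).strip() == reason for r in rows]
--     return sum(actives) - sum(a and b for a, b in zip(actives, actives[1:]))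
-- ===== Notes on version B (the rewrite author's own statement) =====
-- stated objective: alternative
-- what changed: Replaces the prev-flag state machine by an inclusion-exclusion identity: the number of rising edges equals the total count of active rows minus the count of adjacent active-active pairs, computed as two independent aggregate sums.
import Mathlib
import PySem

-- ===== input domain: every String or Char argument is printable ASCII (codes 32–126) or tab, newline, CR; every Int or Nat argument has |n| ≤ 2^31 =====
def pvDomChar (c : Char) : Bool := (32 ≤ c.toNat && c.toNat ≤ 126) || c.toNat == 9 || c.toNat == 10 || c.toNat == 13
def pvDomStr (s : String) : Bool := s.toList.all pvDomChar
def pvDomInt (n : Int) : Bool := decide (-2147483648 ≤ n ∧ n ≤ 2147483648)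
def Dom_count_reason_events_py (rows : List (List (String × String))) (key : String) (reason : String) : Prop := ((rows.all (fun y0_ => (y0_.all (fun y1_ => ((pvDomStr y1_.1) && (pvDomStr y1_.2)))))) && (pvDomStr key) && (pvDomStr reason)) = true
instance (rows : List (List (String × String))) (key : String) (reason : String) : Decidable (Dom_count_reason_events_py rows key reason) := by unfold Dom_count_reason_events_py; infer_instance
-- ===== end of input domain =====

-- B replaces A's prev-flag state machine by an inclusion-exclusion identity:
-- rising edges = (# active rows) - (# adjacent active-active pairs); objective: alternative.

-- ===== PORT A =====
-- state machine: state = (count, prev_active)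
def count_reason_events_py (rows : List (List (String × String))) (key : String) (reason : String) : Int :=
  (rows.foldl
    (fun (st : Int × Bool) r =>
      let cur_active := PySem.Str.strip ((PySem.Dict.mk r).getD key "") == reason
      (if cur_active && !st.2 then st.1 + 1 else st.1, cur_active))
    (0, false)).1

-- ===== PORT B =====
def count_reason_events_py_alt (rows : List (List (String × String))) (key : String) (reason : String) : Int :=
  let actives := rows.map (fun r => PySem.Str.strip ((PySem.Dict.mk r).getD key "") == reason)
  (actives.count true : Int)
    - (((actives.zip actives.tail).filter (fun p => p.1 && p.2)).length : Int)

-- ===== PRECONDITION & SPEC =====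
def Spec_count_reason_events_py (rows : List (List (String × String))) (key : String) (reason : String) (out : Int) : Prop := out = count_reason_events_py_alt rows key reason
instance (rows : List (List (String × String))) (key : String) (reason : String) (out : Int) : Decidable (Spec_count_reason_events_py rows key reason out) := by unfold Spec_count_reason_events_py; infer_instance

-- ===== CLAIM (what is proved, stated in full; the proofs are below) =====
def Claim_equal_count_reason_events_py : Prop := ∀ (rows : List (List (String × String))) (key : String) (reason : String), Dom_count_reason_events_py rows key reason → Spec_count_reason_events_py rows key reason (count_reason_events_py rows key reason)

-- ===== LEMMAS AND PROOFS =====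

-- adjacent true-true pairs in (p :: l), as a recursion carrying the previous element
def pvAdjTT : Bool → List Bool → Nat
  | _, [] => 0
  | p, a :: t => (if p && a then 1 else 0) + pvAdjTT a t

theorem pv_adj_zip (a : Bool) (t : List Bool) :
    pvAdjTT a t = (((a :: t).zip t).filter (fun p => p.1 && p.2)).length := by
  induction t generalizing a with
  | nil => simp [pvAdjTT]
  | cons b r ih =>
    simp only [pvAdjTT, List.zip_cons_cons, List.filter_cons, ih b]
    cases a <;> cases b <;> simp [Nat.add_comm]

theorem pv_foldl_count (l : List Bool) (c : Int) (p : Bool) :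
    (l.foldl (fun (st : Int × Bool) cur =>
        (if cur && !st.2 then st.1 + 1 else st.1, cur)) (c, p)).1
      = c + (l.count true : Int) - (pvAdjTT p l : Int) := by
  induction l generalizing c p with
  | nil => simp [pvAdjTT]
  | cons a t ih =>
    simp only [List.foldl_cons, pvAdjTT]
    rw [ih]
    cases a <;> cases p <;> simp <;> ring

theorem pv_main (rows : List (List (String × String))) (key : String) (reason : String) :
    count_reason_events_py rows key reason = count_reason_events_py_alt rows key reason := by
  unfold count_reason_events_py count_reason_events_py_alt
  rw [show rows.foldl
        (fun (st : Int × Bool) r =>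
          let cur_active := PySem.Str.strip ((PySem.Dict.mk r).getD key "") == reason
          (if cur_active && !st.2 then st.1 + 1 else st.1, cur_active)) ((0 : Int), false)
      = (rows.map (fun r => PySem.Str.strip ((PySem.Dict.mk r).getD key "") == reason)).foldl
          (fun (st : Int × Bool) cur =>
            (if cur && !st.2 then st.1 + 1 else st.1, cur)) ((0 : Int), false)
      from (List.foldl_map (f := fun r => PySem.Str.strip ((PySem.Dict.mk r).getD key "") == reason) (g := fun (st : Int × Bool) cur => (if cur && !st.2 then st.1 + 1 else st.1, cur)) (l := rows) (init := ((0 : Int), false))).symm]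
  rw [pv_foldl_count]
  cases h : rows.map (fun r => PySem.Str.strip ((PySem.Dict.mk r).getD key "") == reason) with
  | nil => simp [pvAdjTT]
  | cons a t => simp [pvAdjTT, pv_adj_zip]

-- ===== VERDICT (by name: the statement is the Claim_ definition above) =====
theorem count_reason_events_py_spec : Claim_equal_count_reason_events_py := by
  intro rows key reason _
  exact pv_main rows key reason
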